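-- pv_equiv track=rewrite | github.com/Poomon001/Competitive-Programming | club python/Merge Two 2D Arrays by Summing Values/main.py | mergeArrays_M2
-- ===== SOURCE A (Python) =====
-- from math import inf
-- from typing import List
--
-- def mergeArrays_M2(nums1: List[List[int]], nums2: List[List[int]]) -> List[List[int]]:
--     ans = []
--     i = j = 0
--     while i < len(nums1) or j < len(nums2):
--         idx1, num1 = (inf, 0) if i >= len(nums1) else nums1[i]
--         idx2, num2 = (inf, 0) if j >= len(nums2) else nums2[j]
--         if idx1 < idx2:
--             ans.append([idx1, num1])
--             i += 1
--         elif idx2 < idx1: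
--             ans.append([idx2, num2])
--             j += 1
--         else:
--             ans.append([idx1, num2 + num1])
--             i += 1
--             j += 1
--
--     return ans
-- ===== SOURCE B (Python) =====
-- def mergeArrays_M2(nums1, nums2):
--     out = []
--     rest = nums2
--     for i1, n1 in nums1:
--         while rest and rest[0][0] < i1:
--             out.append([rest[0][0], rest[0][1]])
--             rest = rest[1:]
--         if rest and rest[0][0] == i1:
--             out.append([i1, rest[0][1] + n1])
--             rest = rest[1:]
--         else:
--             out.append([i1, n1])
--     for i2, n2 in rest:
--         out.append([i2, n2])
--     return out
-- ===== Notes on version B (the rewrite author's own statement) =====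
-- stated objective: alternative
-- what changed: Replaces the single while-loop that walks both arrays simultaneously with (inf,0) sentinel pairs by an asymmetric nested traversal: an outer for over nums1 that first flushes the smaller-id prefix of the remaining nums2, then emits or sums, with a final flush of the nums2 tail - no sentinels and no three-way simultaneous scan.
import Mathlib
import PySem

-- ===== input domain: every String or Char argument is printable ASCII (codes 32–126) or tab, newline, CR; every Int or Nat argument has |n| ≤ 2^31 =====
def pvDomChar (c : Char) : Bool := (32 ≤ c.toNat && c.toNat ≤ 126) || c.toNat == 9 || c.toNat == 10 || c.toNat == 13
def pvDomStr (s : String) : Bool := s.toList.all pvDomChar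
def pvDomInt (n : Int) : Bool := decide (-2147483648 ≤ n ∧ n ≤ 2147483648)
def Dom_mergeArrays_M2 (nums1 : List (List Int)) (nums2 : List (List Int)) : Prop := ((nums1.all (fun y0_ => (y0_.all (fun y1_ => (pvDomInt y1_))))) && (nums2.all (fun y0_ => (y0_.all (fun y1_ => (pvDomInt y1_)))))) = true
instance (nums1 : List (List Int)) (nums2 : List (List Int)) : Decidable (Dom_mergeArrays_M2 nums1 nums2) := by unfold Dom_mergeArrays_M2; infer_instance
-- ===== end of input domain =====

-- B replaces A's sentinel-based simultaneous two-pointer while-loop by an asymmetric nested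
-- traversal (outer for over nums1, inner flush of nums2, final tail flush) — objective: alternative.

-- ===== PORT A =====
-- 'idx, num = nums1[i]' — rows are [id, val] pairs (Pre_ requires length 2; Python raises otherwise)
def pairOf (r : List Int) : Int × Int :=
  match r with
  | [a, b] => (a, b)
  | _ => (0, 0)

-- the while-loop of A, as recursion over the two remaining suffixes (i += 1 / j += 1 = taking
-- tails); an exhausted side plays the role of the (inf, 0) sentinel: the other branch is taken
def mergeA : List (List Int) → List (List Int) → List (List Int)
  | [], [] => []
  | r1 :: t1, [] =>
      [(pairOf r1).1, (pairOf r1).2] :: mergeA t1 []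
  | [], r2 :: t2 =>
      [(pairOf r2).1, (pairOf r2).2] :: mergeA [] t2
  | r1 :: t1, r2 :: t2 =>
      if (pairOf r1).1 < (pairOf r2).1 then
        [(pairOf r1).1, (pairOf r1).2] :: mergeA t1 (r2 :: t2)
      else if (pairOf r2).1 < (pairOf r1).1 then
        [(pairOf r2).1, (pairOf r2).2] :: mergeA (r1 :: t1) t2
      else
        [(pairOf r1).1, (pairOf r2).2 + (pairOf r1).2] :: mergeA t1 t2
  termination_by l1 l2 => l1.length + l2.length

def mergeArrays_M2 (nums1 : List (List Int)) (nums2 : List (List Int)) : List (List Int) :=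
  mergeA nums1 nums2

-- ===== PORT B =====
-- rest[0][0] / rest[0][1]: rows are length-2 under Pre_, so List.getD is exact there
-- (Python raises on shorter rows, which Pre_ excludes)
-- B's inner while: flush the rows of rest whose id is below the current nums1 id
def flushB (bound : Int) : List (List Int) → List (List Int) → List (List Int) × List (List Int)
  | r :: t, out =>
      if r.getD 0 0 < bound then flushB bound t (out ++ [[r.getD 0 0, r.getD 1 0]])
      else (r :: t, out)
  | [], out => ([], out)

-- B's outer for over nums1 (with the final 'for i2, n2 in rest' flush in the base case)
def outerB : List (List Int) → List (List Int) → List (List Int) → List (List Int)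
  | [], rest, out => rest.foldl (fun o r => o ++ [[r.getD 0 0, r.getD 1 0]]) out
  | r1 :: t1, rest, out =>
      match flushB (r1.getD 0 0) rest out with
      | (r :: t, out') =>
          if r.getD 0 0 == r1.getD 0 0 then
            outerB t1 t (out' ++ [[r1.getD 0 0, r.getD 1 0 + r1.getD 1 0]])
          else
            outerB t1 (r :: t) (out' ++ [[r1.getD 0 0, r1.getD 1 0]])
      | ([], out') => outerB t1 [] (out' ++ [[r1.getD 0 0, r1.getD 1 0]])

def mergeArrays_M2_alt (nums1 : List (List Int)) (nums2 : List (List Int)) : List (List Int) :=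
  outerB nums1 nums2 []

-- ===== PRECONDITION & SPEC =====
-- Pre_ = exactly the inputs on which A returns: every row must be an [id, val] pair of length 2
-- (on any other row A's 'idx, num = row' unpacking raises ValueError).
def Pre_mergeArrays_M2 (nums1 : List (List Int)) (nums2 : List (List Int)) : Prop :=
  (∀ r ∈ nums1, r.length = 2) ∧ (∀ r ∈ nums2, r.length = 2)
instance (nums1 : List (List Int)) (nums2 : List (List Int)) : Decidable (Pre_mergeArrays_M2 nums1 nums2) := by unfold Pre_mergeArrays_M2; infer_instance

def pvWitness_mergeArrays_M2 : List (List Int) × List (List Int) :=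
  ([[1, 2], [4, 5], [2, 3]], [[1, 4], [3, 2], [4, 1]])

def Spec_mergeArrays_M2 (nums1 : List (List Int)) (nums2 : List (List Int)) (out : List (List Int)) : Prop := out = mergeArrays_M2_alt nums1 nums2
instance (nums1 : List (List Int)) (nums2 : List (List Int)) (out : List (List Int)) : Decidable (Spec_mergeArrays_M2 nums1 nums2 out) := by unfold Spec_mergeArrays_M2; infer_instance

-- ===== CLAIM (what is proved, stated in full; the proofs are below) =====
def Claim_equal_mergeArrays_M2 : Prop := ∀ (nums1 : List (List Int)) (nums2 : List (List Int)), Dom_mergeArrays_M2 nums1 nums2 → Pre_mergeArrays_M2 nums1 nums2 → Spec_mergeArrays_M2 nums1 nums2 (mergeArrays_M2 nums1 nums2)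

-- ===== LEMMAS AND PROOFS =====

theorem key_eq (r : List Int) (h : r.length = 2) :
    r.getD 0 0 = (pairOf r).1 ∧ r.getD 1 0 = (pairOf r).2 := by
  rcases r with _ | ⟨a, _ | ⟨b, _ | ⟨c, t⟩⟩⟩ <;> simp_all [pairOf]

theorem mergeA_nil_left (l2 : List (List Int)) :
    mergeA [] l2 = l2.map (fun r => [(pairOf r).1, (pairOf r).2]) := by
  induction l2 with
  | nil => rw [mergeA]; rfl
  | cons r t ih => rw [mergeA, ih]; rfl

theorem outerB_eq (n1 : List (List Int)) :
    ∀ rest out, (∀ r ∈ n1, r.length = 2) → (∀ r ∈ rest, r.length = 2) →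
    outerB n1 rest out = out ++ mergeA n1 rest := by
  induction n1 with
  | nil =>
    intro rest out _ h2
    rw [outerB, mergeA_nil_left]
    induction rest generalizing out with
    | nil => simp
    | cons q t ih =>
      simp only [List.mem_cons, forall_eq_or_imp] at h2
      rw [List.foldl_cons, List.map_cons, ih _ h2.2]
      rw [(key_eq q h2.1).1, (key_eq q h2.1).2, List.append_assoc]
      rfl
  | cons r1 t1 ihout =>
    intro rest out h1 h2
    simp only [List.mem_cons, forall_eq_or_imp] at h1
    obtain ⟨hr1, ht1⟩ := h1
    obtain ⟨hk1, hv1⟩ := key_eq r1 hr1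
    induction rest generalizing out with
    | nil =>
      rw [outerB]
      show outerB t1 [] (out ++ [[r1.getD 0 0, r1.getD 1 0]]) = out ++ mergeA (r1 :: t1) []
      rw [ihout [] _ ht1 (by simp), mergeA, hk1, hv1, List.append_assoc]
      rfl
    | cons q t ihin =>
      simp only [List.mem_cons, forall_eq_or_imp] at h2
      obtain ⟨hq, ht⟩ := h2
      obtain ⟨hkq, hvq⟩ := key_eq q hq
      by_cases hlt : q.getD 0 0 < r1.getD 0 0
      · have hstep : outerB (r1 :: t1) (q :: t) out
            = outerB (r1 :: t1) t (out ++ [[q.getD 0 0, q.getD 1 0]]) := by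
          rw [outerB, outerB, flushB, if_pos hlt]
        rw [hstep, ihin _ ht, mergeA, if_neg (by omega), if_pos (by omega)]
        rw [hkq, hvq, List.append_assoc]
        rfl
      · have hfl : flushB (r1.getD 0 0) (q :: t) out = (q :: t, out) := by
          rw [flushB, if_neg hlt]
        rw [outerB, hfl]
        by_cases heq : q.getD 0 0 = r1.getD 0 0
        · simp only [heq, BEq.rfl, if_true]
          rw [ihout t _ ht1 ht, mergeA, if_neg (by omega), if_neg (by omega),
            hvq, List.append_assoc, hk1, hv1]
          rfl
        · have : (q.getD 0 0 == r1.getD 0 0) = false := by simpa using heq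
          simp only [this, Bool.false_eq_true, if_false]
          rw [ihout (q :: t) _ ht1 (by simp only [List.mem_cons, forall_eq_or_imp]; exact ⟨hq, ht⟩), mergeA,
            if_pos (by omega), List.append_assoc, hk1, hv1]
          rfl

-- ===== VERDICT (by name: the statement is the Claim_ definition above) =====
theorem mergeArrays_M2_spec : Claim_equal_mergeArrays_M2 := by
  intro n1 n2 _ hpre
  obtain ⟨h1, h2⟩ := hpre
  unfold Spec_mergeArrays_M2 mergeArrays_M2 mergeArrays_M2_alt
  rw [outerB_eq n1 n2 [] h1 h2]
  rfl
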